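-- pv_equiv track=rewrite | github.com/Muzzh/Codefights | TheCore/LoopTunnel/MagicalWell.py | magicalWell
-- ===== SOURCE A (Python) =====
-- def magicalWell(a, b, n):
--     tot = 0
--     while n > 0 :
--         tot += (a*b)
--         a += 1
--         b += 1
--         n -= 1
--     return tot
-- ===== SOURCE B (Python) =====
-- def magicalWell(a, b, n):
--     if n <= 0:
--         return 0
--     return n*a*b + (a+b)*(n*(n-1)//2) + n*(n-1)*(2*n-1)//6
-- ===== Notes on version B (the rewrite author's own statement) =====
-- stated objective: faster
-- what changed: Replaced the O(n) accumulation loop by the closed-form sum n*a*b + (a+b)*T(n-1) + sum-of-squares formula, computed in O(1).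
import Mathlib
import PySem

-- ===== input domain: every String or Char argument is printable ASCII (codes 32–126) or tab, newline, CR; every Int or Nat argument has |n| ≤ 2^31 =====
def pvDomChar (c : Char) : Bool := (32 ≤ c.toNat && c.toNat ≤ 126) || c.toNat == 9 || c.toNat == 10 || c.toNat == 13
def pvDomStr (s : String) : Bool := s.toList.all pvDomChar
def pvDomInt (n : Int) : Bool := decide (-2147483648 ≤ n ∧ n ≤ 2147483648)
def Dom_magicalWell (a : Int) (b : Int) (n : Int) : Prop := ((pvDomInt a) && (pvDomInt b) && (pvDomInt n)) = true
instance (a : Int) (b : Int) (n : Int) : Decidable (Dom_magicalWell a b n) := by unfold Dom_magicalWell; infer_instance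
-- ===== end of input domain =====

-- B replaces A's O(n) accumulation loop by the closed-form sum (faster, asymptotic).
-- ===== PORT A =====
-- the while loop: tot += a*b; a += 1; b += 1; n -= 1, iterated while n > 0
def mwLoop (tot : Int) (a : Int) (b : Int) : Nat → Int
  | 0 => tot
  | k + 1 => mwLoop (tot + a * b) (a + 1) (b + 1) k

def magicalWell (a : Int) (b : Int) (n : Int) : Int := mwLoop 0 a b n.toNat

-- ===== PORT B =====
def magicalWell_alt (a : Int) (b : Int) (n : Int) : Int :=
  if n ≤ 0 then 0
  else n * a * b + (a + b) * PySem.Int.floordiv (n * (n - 1)) 2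
        + PySem.Int.floordiv (n * (n - 1) * (2 * n - 1)) 6

-- ===== PRECONDITION & SPEC =====
def Spec_magicalWell (a : Int) (b : Int) (n : Int) (out : Int) : Prop := out = magicalWell_alt a b n
instance (a : Int) (b : Int) (n : Int) (out : Int) : Decidable (Spec_magicalWell a b n out) := by unfold Spec_magicalWell; infer_instance

-- ===== CLAIM (what is proved, stated in full; the proofs are below) =====
def Claim_equal_magicalWell : Prop := ∀ (a : Int) (b : Int) (n : Int), Dom_magicalWell a b n → Spec_magicalWell a b n (magicalWell a b n)

-- ===== LEMMAS AND PROOFS =====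

-- ===== VERDICT (by name: the statement is the Claim_ definition above) =====
-- unrolling one step at the END of the loop
lemma mwLoop_succ (tot a b : Int) (k : Nat) :
    mwLoop tot a b (k + 1) = mwLoop tot a b k + (a + k) * (b + k) := by
  induction k generalizing tot a b with
  | zero => simp [mwLoop]
  | succ k ih =>
      have h1 : mwLoop tot a b (k + 2) = mwLoop (tot + a * b) (a + 1) (b + 1) (k + 1) := rfl
      rw [h1, ih]
      have h2 : mwLoop tot a b (k + 1) = mwLoop (tot + a * b) (a + 1) (b + 1) k := rfl
      rw [h2]
      push_cast
      ring

lemma mwLoop_closed (a b : Int) (k : Nat) :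
    6 * mwLoop 0 a b k =
      6 * k * a * b + 3 * (a + b) * (k * (k - 1)) + k * (k - 1) * (2 * k - 1) := by
  induction k with
  | zero => simp [mwLoop]
  | succ k ih =>
      rw [mwLoop_succ, mul_add, ih]
      push_cast
      ring

lemma two_dvd_pred_mul (n : Int) : 2 ∣ n * (n - 1) := by
  rcases Int.even_or_odd n with ⟨m, hm⟩ | ⟨m, hm⟩
  · exact ⟨m * (n - 1), by rw [hm]; ring⟩
  · exact ⟨n * m, by rw [hm]; ring⟩

lemma six_dvd_sq (n : Int) : 6 ∣ n * (n - 1) * (2 * n - 1) := by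
  have h : ((n : ZMod 6) * ((n : ZMod 6) - 1) * (2 * (n : ZMod 6) - 1)) = 0 := by
    have : ∀ x : ZMod 6, x * (x - 1) * (2 * x - 1) = 0 := by decide
    exact this _
  have := (ZMod.intCast_zmod_eq_zero_iff_dvd (n * (n - 1) * (2 * n - 1)) 6).mp (by push_cast; exact h)
  exact_mod_cast this

lemma fdiv_of_dvd (c d q : Int) (hd : 0 < d) (h : c = d * q) : PySem.Int.floordiv c d = q := by
  rw [PySem.Int.floordiv_eq_ediv_of_pos hd, h, Int.mul_ediv_cancel_left _ (by omega)]

theorem magicalWell_spec : Claim_equal_magicalWell := by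
  intro a b n _
  unfold Spec_magicalWell magicalWell magicalWell_alt
  by_cases hn : n ≤ 0
  · have : n.toNat = 0 := by omega
    simp [this, mwLoop, hn]
  · simp only [if_neg hn]
    obtain ⟨q2, hq2⟩ := two_dvd_pred_mul n
    obtain ⟨q6, hq6⟩ := six_dvd_sq n
    rw [fdiv_of_dvd _ _ _ (by omega) hq2, fdiv_of_dvd _ _ _ (by omega) hq6]
    have hclosed := mwLoop_closed a b n.toNat
    have hcast : ((n.toNat : Int)) = n := by omega
    rw [hcast] at hclosed
    have h6 : 6 * mwLoop 0 a b n.toNat = 6 * (n * a * b + (a + b) * q2 + q6) := by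
      rw [hclosed, hq6, hq2]; ring
    omega
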